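-- pv_equiv track=rewrite | github.com/rodrigorahal/advent-of-code-2024 | 08/main.py | intercept
-- ===== SOURCE A (Python) =====
-- def lines(antennas):
--     ls = []
--     for coords in antennas.values():
--         for i, a in enumerate(coords):
--             for b in coords[i + 1 :]:
--                 arow, acol = a
--                 brow, bcol = b
--                 ls.append((arow, acol, brow - arow, bcol - acol))
--     return ls
--
-- def on_line(row, col, lrow, lcol, dr, dc):
--     DR, DC = row - lrow, col - lcol
--     if dr and dc:
--         return DR * dc == DC * dr and DR % dr == 0
--     if dr:
--         return DR % dr == 0
--     if dc:
--         return DC % dc == 0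
--
-- def intercept(grid, antennas):
--     H, W = len(grid), len(grid[0])
--     ls = lines(antennas)
--     count = 0
--     for row in range(H):
--         for col in range(W):
--             for line in ls:
--                 if on_line(row, col, *line):
--                     count += 1
--                     break
--     return count
-- ===== SOURCE B (Python) =====
-- def cells_on_line(H, W, arow, acol, dr, dc):
--     """All in-bounds cells (row, col) satisfying A's on_line predicate for this line."""
--     out = []
--     if dr and dc:
--         # collinear lattice points: row = arow + k*dr, col = acol + k*dc
--         for row in range(H):
--             if (row - arow) % dr == 0:
--                 col = acol + (row - arow) // dr * dc
--                 if 0 <= col < W: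
--                     out.append((row, col))
--     elif dr:
--         # dc == 0: every cell whose row offset is a multiple of dr
--         for row in range(H):
--             if (row - arow) % dr == 0:
--                 out.extend((row, col) for col in range(W))
--     elif dc:
--         # dr == 0: every cell whose col offset is a multiple of dc
--         for col in range(W):
--             if (col - acol) % dc == 0:
--                 out.extend((row, col) for row in range(H))
--     return out
--
-- def intercept(grid, antennas):
--     H, W = len(grid), len(grid[0])
--     ls = [(a[0], a[1], b[0] - a[0], b[1] - a[1])
--           for coords in antennas.values()
--           for i, a in enumerate(coords)
--           for b in coords[i + 1:]]
--     hit = set()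
--     # duplicate lines cover the same cells: process each distinct line once
--     for (lr, lc, dr, dc) in set(ls):
--         hit.update(cells_on_line(H, W, lr, lc, dr, dc))
--     return len(hit)
-- ===== Notes on version B (the rewrite author's own statement) =====
-- stated objective: alternative
-- what changed: Instead of testing every grid cell against every line with an early break (cell-major triple loop), B enumerates each distinct line's in-bounds lattice cells directly (one pass of length H or W per distinct line) and counts the union as a set.
import Mathlib
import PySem

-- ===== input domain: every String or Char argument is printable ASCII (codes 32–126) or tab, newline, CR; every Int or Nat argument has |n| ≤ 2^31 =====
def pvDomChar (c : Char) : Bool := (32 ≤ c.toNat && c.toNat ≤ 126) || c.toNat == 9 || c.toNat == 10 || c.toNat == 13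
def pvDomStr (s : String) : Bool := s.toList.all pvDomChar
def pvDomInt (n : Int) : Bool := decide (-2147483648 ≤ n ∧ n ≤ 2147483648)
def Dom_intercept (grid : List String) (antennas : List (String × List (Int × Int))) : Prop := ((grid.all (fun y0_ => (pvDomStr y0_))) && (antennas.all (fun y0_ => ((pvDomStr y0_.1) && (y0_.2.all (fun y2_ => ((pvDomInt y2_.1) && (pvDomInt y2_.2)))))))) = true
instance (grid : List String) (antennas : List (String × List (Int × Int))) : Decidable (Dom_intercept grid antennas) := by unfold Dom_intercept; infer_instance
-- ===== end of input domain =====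

-- B replaces A's cell-major triple loop (every grid cell tested against every antenna line)
-- by enumerating each line's in-bounds lattice cells directly and counting the union as a set.


-- ===== PORT A =====
def onLine (row col lrow lcol dr dc : Int) : Bool :=
  let DR := row - lrow
  let DC := col - lcol
  if dr ≠ 0 ∧ dc ≠ 0 then decide (DR * dc = DC * dr) && decide (PySem.Int.mod DR dr = 0)
  else if dr ≠ 0 then decide (PySem.Int.mod DR dr = 0)
  else if dc ≠ 0 then decide (PySem.Int.mod DC dc = 0)
  else false  -- Python returns None (falsy) here

def linesA (antennas : List (String × List (Int × Int))) : List (Int × Int × Int × Int) :=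
  (PySem.Dict.ofList antennas).values.foldl (fun ls coords =>
    (PySem.List.enumerate coords 0).foldl (fun ls ia =>
      (PySem.List.slice coords (some (ia.1 + 1)) none).foldl (fun ls b =>
        ls ++ [(ia.2.1, ia.2.2, b.1 - ia.2.1, b.2 - ia.2.2)]) ls) ls) []

def intercept (grid : List String) (antennas : List (String × List (Int × Int))) : Int :=
  match PySem.List.pyGet? grid 0 with
  | none => 0  -- grid[0] raises IndexError: unreachable under Pre_intercept
  | some g0 =>
    let H : Int := grid.length
    let W : Int := PySem.Str.len g0
    let ls := linesA antennas
    (PySem.List.pyRange 0 H 1).foldl (fun count row =>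
      (PySem.List.pyRange 0 W 1).foldl (fun count col =>
        if ls.any (fun l => onLine row col l.1 l.2.1 l.2.2.1 l.2.2.2) then count + 1
        else count) count) 0

-- ===== PORT B =====
def cellsOnLine (H W arow acol dr dc : Int) : List (Int × Int) :=
  if dr ≠ 0 ∧ dc ≠ 0 then
    (PySem.List.pyRange 0 H 1).foldl (fun out row =>
      if PySem.Int.mod (row - arow) dr = 0 then
        let col := acol + PySem.Int.floordiv (row - arow) dr * dc
        if 0 ≤ col ∧ col < W then out ++ [(row, col)] else out
      else out) []
  else if dr ≠ 0 then
    (PySem.List.pyRange 0 H 1).foldl (fun out row =>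
      if PySem.Int.mod (row - arow) dr = 0 then
        out ++ (PySem.List.pyRange 0 W 1).map (fun col => (row, col))
      else out) []
  else if dc ≠ 0 then
    (PySem.List.pyRange 0 W 1).foldl (fun out col =>
      if PySem.Int.mod (col - acol) dc = 0 then
        out ++ (PySem.List.pyRange 0 H 1).map (fun row => (row, col))
      else out) []
  else []

def intercept_alt (grid : List String) (antennas : List (String × List (Int × Int))) : Int :=
  match PySem.List.pyGet? grid 0 with
  | none => 0  -- grid[0] raises IndexError: unreachable under Pre_intercept
  | some g0 =>
    let H : Int := grid.length
    let W : Int := PySem.Str.len g0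
    let ls := (PySem.Dict.ofList antennas).values.flatMap (fun coords =>
      (PySem.List.enumerate coords 0).flatMap (fun ia =>
        (PySem.List.slice coords (some (ia.1 + 1)) none).map (fun b =>
          (ia.2.1, ia.2.2, b.1 - ia.2.1, b.2 - ia.2.2))))
    -- duplicate lines cover the same cells: B iterates over set(ls)
    let hit : PySem.Set (Int × Int) := (PySem.Set.ofList ls).foldl (fun h l =>
      PySem.Set.update h (cellsOnLine H W l.1 l.2.1 l.2.2.1 l.2.2.2)) PySem.Set.empty
    (hit.length : Int)

-- ===== PRECONDITION & SPEC =====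
-- Pre_ excludes only grid = [], where the Python A (and B) raise IndexError on grid[0].
def Pre_intercept (grid : List String) (antennas : List (String × List (Int × Int))) : Prop :=
  grid ≠ []
instance (grid : List String) (antennas : List (String × List (Int × Int))) : Decidable (Pre_intercept grid antennas) := by unfold Pre_intercept; infer_instance

def pvWitness_intercept : List String × (List (String × List (Int × Int))) :=
  (["ab", "cd"], [("a", [(0, 0), (1, 1)])])

def Spec_intercept (grid : List String) (antennas : List (String × List (Int × Int))) (out : Int) : Prop := out = intercept_alt grid antennas
instance (grid : List String) (antennas : List (String × List (Int × Int))) (out : Int) : Decidable (Spec_intercept grid antennas out) := by unfold Spec_intercept; infer_instance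

-- ===== CLAIM =====
def Claim_equal_intercept : Prop := ∀ (grid : List String) (antennas : List (String × List (Int × Int))), Dom_intercept grid antennas → Pre_intercept grid antennas → Spec_intercept grid antennas (intercept grid antennas)

-- ===== LEMMAS AND PROOFS =====

-- A's lines loop and B's comprehension build the same list of lines.
lemma linesA_eq (antennas : List (String × List (Int × Int))) :
    linesA antennas = (PySem.Dict.ofList antennas).values.flatMap (fun coords =>
      (PySem.List.enumerate coords 0).flatMap (fun ia =>
        (PySem.List.slice coords (some (ia.1 + 1)) none).map (fun b =>
          (ia.2.1, ia.2.2, b.1 - ia.2.1, b.2 - ia.2.2)))) := by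
  unfold linesA
  simp only [PySem.List.foldl_append_singleton_eq_map, PySem.List.foldl_append_eq_flatMap,
    List.nil_append]

-- Membership in B's per-line cell list is exactly "in bounds and on the line".
lemma mem_cellsOnLine (H W lr lc dr dc row col : Int) :
    (row, col) ∈ cellsOnLine H W lr lc dr dc ↔
      (0 ≤ row ∧ row < H ∧ 0 ≤ col ∧ col < W ∧ onLine row col lr lc dr dc = true) := by
  unfold cellsOnLine onLine
  by_cases h1 : dr ≠ 0 ∧ dc ≠ 0
  · simp only [if_pos h1]
    have hb : (fun (out : List (Int × Int)) (r : Int) =>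
        if PySem.Int.mod (r - lr) dr = 0 then
          let c := lc + PySem.Int.floordiv (r - lr) dr * dc
          if 0 ≤ c ∧ c < W then out ++ [(r, c)] else out
        else out) = fun out r =>
        if PySem.Int.mod (r - lr) dr = 0 ∧ 0 ≤ lc + PySem.Int.floordiv (r - lr) dr * dc ∧
            lc + PySem.Int.floordiv (r - lr) dr * dc < W then
          out ++ [(r, lc + PySem.Int.floordiv (r - lr) dr * dc)] else out := by
      funext out r
      by_cases hm : PySem.Int.mod (r - lr) dr = 0 <;>
        by_cases hc : 0 ≤ lc + PySem.Int.floordiv (r - lr) dr * dc ∧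
          lc + PySem.Int.floordiv (r - lr) dr * dc < W <;>
        simp [hm, hc]
    rw [hb, PySem.List.foldl_append_ite
      (p := fun r => PySem.Int.mod (r - lr) dr = 0 ∧ 0 ≤ lc + PySem.Int.floordiv (r - lr) dr * dc ∧
        lc + PySem.Int.floordiv (r - lr) dr * dc < W)
      (f := fun r => (r, lc + PySem.Int.floordiv (r - lr) dr * dc))]
    simp only [List.nil_append, List.mem_map, List.mem_filter, PySem.List.mem_pyRange_one,
      decide_eq_true_eq, Prod.mk.injEq]
    constructor
    · rintro ⟨r, ⟨⟨hr0, hrH⟩, hm, hc0, hcW⟩, rfl, rfl⟩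
      have hq := PySem.Int.floordiv_mul_add_mod (r - lr) dr
      rw [hm, add_zero] at hq
      refine ⟨hr0, hrH, hc0, hcW, ?_⟩
      simp only [Bool.and_eq_true, decide_eq_true_eq]
      exact ⟨by linear_combination -dc * hq, hm⟩
    · rintro ⟨hr0, hrH, hc0, hcW, hon⟩
      simp only [Bool.and_eq_true, decide_eq_true_eq] at hon
      obtain ⟨hcol, hm⟩ := hon
      have hq := PySem.Int.floordiv_mul_add_mod (row - lr) dr
      rw [hm, add_zero] at hq
      have hcc : col = lc + PySem.Int.floordiv (row - lr) dr * dc := by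
        have h2 : (col - lc) * dr = PySem.Int.floordiv (row - lr) dr * dc * dr := by
          linear_combination -hcol - dc * hq
        have := mul_right_cancel₀ h1.1 h2
        omega
      exact ⟨row, ⟨⟨hr0, hrH⟩, hm, by rw [← hcc]; exact hc0, by rw [← hcc]; exact hcW⟩, rfl, hcc.symm⟩
  · simp only [if_neg h1]
    by_cases h2 : dr ≠ 0
    · have hdc : dc = 0 := by tauto
      simp only [if_pos h2]
      have hb : (fun (out : List (Int × Int)) (r : Int) =>
          if PySem.Int.mod (r - lr) dr = 0 then
            out ++ (PySem.List.pyRange 0 W 1).map (fun c => (r, c))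
          else out) = fun out r =>
          out ++ (if PySem.Int.mod (r - lr) dr = 0 then
            (PySem.List.pyRange 0 W 1).map (fun c => (r, c)) else []) := by
        funext out r
        by_cases hm : PySem.Int.mod (r - lr) dr = 0 <;> simp [hm]
      rw [hb, PySem.List.foldl_append_eq_flatMap]
      simp only [List.nil_append, List.mem_flatMap, PySem.List.mem_pyRange_one]
      constructor
      · rintro ⟨r, ⟨hr0, hrH⟩, hmem⟩
        by_cases hm : PySem.Int.mod (r - lr) dr = 0
        · simp only [if_pos hm, List.mem_map, PySem.List.mem_pyRange_one, Prod.mk.injEq] at hmem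
          obtain ⟨c, hc, rfl, rfl⟩ := hmem
          exact ⟨hr0, hrH, hc.1, hc.2, by simp [hm]⟩
        · simp [hm] at hmem
      · rintro ⟨hr0, hrH, hc0, hcW, hon⟩
        simp only [decide_eq_true_eq] at hon
        exact ⟨row, ⟨hr0, hrH⟩, by
          simp only [if_pos hon, List.mem_map, PySem.List.mem_pyRange_one, Prod.mk.injEq]
          exact ⟨col, ⟨hc0, hcW⟩, by simp⟩⟩
    · by_cases h3 : dc ≠ 0
      · simp only [if_neg h2, if_pos h3]
        have hb : (fun (out : List (Int × Int)) (c : Int) =>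
            if PySem.Int.mod (c - lc) dc = 0 then
              out ++ (PySem.List.pyRange 0 H 1).map (fun r => (r, c))
            else out) = fun out c =>
            out ++ (if PySem.Int.mod (c - lc) dc = 0 then
              (PySem.List.pyRange 0 H 1).map (fun r => (r, c)) else []) := by
          funext out c
          by_cases hm : PySem.Int.mod (c - lc) dc = 0 <;> simp [hm]
        rw [hb, PySem.List.foldl_append_eq_flatMap]
        simp only [List.nil_append, List.mem_flatMap, PySem.List.mem_pyRange_one]
        constructor
        · rintro ⟨c, ⟨hc0, hcW⟩, hmem⟩
          by_cases hm : PySem.Int.mod (c - lc) dc = 0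
          · simp only [if_pos hm, List.mem_map, PySem.List.mem_pyRange_one, Prod.mk.injEq] at hmem
            obtain ⟨r, hr, rfl, rfl⟩ := hmem
            exact ⟨hr.1, hr.2, hc0, hcW, by simp [hm]⟩
          · simp [hm] at hmem
        · rintro ⟨hr0, hrH, hc0, hcW, hon⟩
          simp only [decide_eq_true_eq] at hon
          exact ⟨col, ⟨hc0, hcW⟩, by
            simp only [if_pos hon, List.mem_map, PySem.List.mem_pyRange_one, Prod.mk.injEq]
            exact ⟨row, ⟨hr0, hrH⟩, by simp⟩⟩
      · simp [h2, h3]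

-- Membership in the accumulated hit set.
lemma mem_hit (g : Int × Int × Int × Int → List (Int × Int)) (ls : List (Int × Int × Int × Int))
    (h0 : PySem.Set (Int × Int)) (p : Int × Int) :
    p ∈ ls.foldl (fun h l => PySem.Set.update h (g l)) h0 ↔ p ∈ h0 ∨ ∃ l ∈ ls, p ∈ g l := by
  induction ls generalizing h0 with
  | nil => simp
  | cons l t ih =>
    simp only [List.foldl_cons, ih, PySem.Set.mem_update, List.mem_cons]
    constructor
    · rintro ((h | h) | ⟨x, hx, hp⟩)
      · exact Or.inl h
      · exact Or.inr ⟨l, Or.inl rfl, h⟩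
      · exact Or.inr ⟨x, Or.inr hx, hp⟩
    · rintro (h | ⟨x, (rfl | hx), hp⟩)
      · exact Or.inl (Or.inl h)
      · exact Or.inl (Or.inr hp)
      · exact Or.inr ⟨x, hx, hp⟩

lemma nodup_hit (g : Int × Int × Int × Int → List (Int × Int)) (ls : List (Int × Int × Int × Int))
    (h0 : PySem.Set (Int × Int)) (hn : h0.Nodup) :
    (ls.foldl (fun h l => PySem.Set.update h (g l)) h0).Nodup := by
  induction ls generalizing h0 with
  | nil => exact hn
  | cons l t ih => exact ih _ (PySem.Set.nodup_update _ _ hn)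

-- A's counting double loop counts the grid cells satisfying the any-line predicate.
lemma countA_eq (H W : Int) (P : Int → Int → Bool) :
    (PySem.List.pyRange 0 H 1).foldl (fun count row =>
      (PySem.List.pyRange 0 W 1).foldl (fun count col =>
        if P row col then count + 1 else count) count) 0 =
    ((((PySem.List.pyRange 0 H 1).flatMap (fun r =>
        (PySem.List.pyRange 0 W 1).map (fun c => (r, c)))).filter (fun p => P p.1 p.2)).length : Int) := by
  simp only [PySem.List.foldl_if_add_one, PySem.List.foldl_add, List.filter_flatMap,
    List.length_flatMap, List.filter_map, List.length_map]
  push_cast [Nat.cast_list_sum]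
  simp [Function.comp_def, List.countP_eq_length_filter]

lemma nodup_gridPairs (H W : Int) :
    ((PySem.List.pyRange 0 H 1).flatMap (fun r =>
      (PySem.List.pyRange 0 W 1).map (fun c => (r, c)))).Nodup := by
  have h : ((PySem.List.pyRange 0 H 1).flatMap (fun r =>
      (PySem.List.pyRange 0 W 1).map (fun c => (r, c)))) =
      (PySem.List.pyRange 0 H 1) ×ˢ (PySem.List.pyRange 0 W 1) := rfl
  rw [h]
  exact List.Nodup.product (PySem.List.nodup_pyRange_one 0 H) (PySem.List.nodup_pyRange_one 0 W)

-- ===== VERDICT =====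
theorem intercept_spec : Claim_equal_intercept := by
  intro grid antennas _ hpre
  unfold Spec_intercept
  cases grid with
  | nil => exact absurd rfl hpre
  | cons g0 t =>
    have hget : PySem.List.pyGet? (g0 :: t) 0 = some g0 := by simp [pysem]
    unfold intercept intercept_alt
    simp only [hget]
    rw [linesA_eq antennas, countA_eq]
    set H : Int := ((g0 :: t).length : Int) with hH
    set W : Int := PySem.Str.len g0 with hW
    set L := (PySem.Dict.ofList antennas).values.flatMap (fun coords =>
      (PySem.List.enumerate coords 0).flatMap (fun ia =>
        (PySem.List.slice coords (some (ia.1 + 1)) none).map (fun b =>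
          (ia.2.1, ia.2.2, b.1 - ia.2.1, b.2 - ia.2.2)))) with hL
    have hndS : (((PySem.List.pyRange 0 H 1).flatMap (fun r =>
        (PySem.List.pyRange 0 W 1).map (fun c => (r, c)))).filter
          (fun p => L.any (fun l => onLine p.1 p.2 l.1 l.2.1 l.2.2.1 l.2.2.2))).Nodup :=
      (nodup_gridPairs H W).filter _
    have hndH : ((PySem.Set.ofList L).foldl (fun h l =>
        PySem.Set.update h (cellsOnLine H W l.1 l.2.1 l.2.2.1 l.2.2.2)) PySem.Set.empty).Nodup :=
      nodup_hit _ (PySem.Set.ofList L) PySem.Set.empty List.nodup_nil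
    have hmem : ∀ p, p ∈ ((PySem.List.pyRange 0 H 1).flatMap (fun r =>
        (PySem.List.pyRange 0 W 1).map (fun c => (r, c)))).filter
          (fun p => L.any (fun l => onLine p.1 p.2 l.1 l.2.1 l.2.2.1 l.2.2.2)) ↔
        p ∈ (PySem.Set.ofList L).foldl (fun h l =>
          PySem.Set.update h (cellsOnLine H W l.1 l.2.1 l.2.2.1 l.2.2.2)) PySem.Set.empty := by
      rintro ⟨r, c⟩
      rw [mem_hit]
      simp only [List.mem_filter, List.mem_flatMap, List.mem_map, PySem.List.mem_pyRange_one,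
        Prod.mk.injEq, List.any_eq_true, PySem.Set.empty, List.not_mem_nil, false_or,
        PySem.Set.mem_ofList]
      constructor
      · rintro ⟨⟨r', hr', c', hc', rfl, rfl⟩, l, hl, hon⟩
        exact ⟨l, hl, (mem_cellsOnLine H W l.1 l.2.1 l.2.2.1 l.2.2.2 r' c').2
          ⟨hr'.1, hr'.2, hc'.1, hc'.2, hon⟩⟩
      · rintro ⟨l, hl, hmem⟩
        obtain ⟨hr0, hrH, hc0, hcW, hon⟩ :=
          (mem_cellsOnLine H W l.1 l.2.1 l.2.2.1 l.2.2.2 r c).1 hmem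
        exact ⟨⟨r, ⟨hr0, hrH⟩, c, ⟨hc0, hcW⟩, rfl, rfl⟩, l, hl, hon⟩
    exact congrArg (Int.ofNat)
      (((List.perm_ext_iff_of_nodup hndS hndH).2 hmem).length_eq)
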